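-- pv_equiv track=rewrite | github.com/YezzuzBruno/ADA | insertionSort/generarTodosCasos.py | generar_arreglos_best_case
-- ===== SOURCE A (Python) =====
-- def generar_arreglos_best_case(n):
--     result=[]
--     for i in range (0, n+1, 100):
--         lista = []
--         for j in range(1, i+1):
--             lista.append(j)
--         result.append(lista)
--     return result
-- ===== SOURCE B (Python) =====
-- def generar_arreglos_best_case(n):
--     result = []
--     current = []
--     for i in range(0, n + 1, 100):
--         current.extend(range(len(current) + 1, i + 1))
--         result.append(current[:])
--     return result
-- ===== Notes on version B (the rewrite author's own statement) =====
-- stated objective: faster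
-- what changed: B keeps one running prefix list and extends it by only the new values each step (appending a copy), instead of rebuilding [1..i] from scratch for every i.
import Mathlib
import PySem

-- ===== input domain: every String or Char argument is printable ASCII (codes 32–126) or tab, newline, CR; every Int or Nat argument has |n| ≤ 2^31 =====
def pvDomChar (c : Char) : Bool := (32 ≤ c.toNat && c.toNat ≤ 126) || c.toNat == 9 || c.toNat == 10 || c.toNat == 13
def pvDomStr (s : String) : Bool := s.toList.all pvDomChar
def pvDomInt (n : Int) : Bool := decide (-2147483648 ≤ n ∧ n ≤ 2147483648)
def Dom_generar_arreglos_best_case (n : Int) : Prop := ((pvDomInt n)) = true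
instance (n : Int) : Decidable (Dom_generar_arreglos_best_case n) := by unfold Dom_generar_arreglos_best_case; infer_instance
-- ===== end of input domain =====

-- B keeps one running prefix and extends it with only the new values each step (constant-factor faster); A rebuilds [1..i] from scratch for every i.

-- ===== PORT A =====
def generar_arreglos_best_case (n : Int) : List (List Int) :=
  (PySem.List.pyRange 0 (n + 1) 100).foldl
    (fun result i =>
      let lista := (PySem.List.pyRange 1 (i + 1) 1).foldl (fun lista j => lista ++ [j]) []
      result ++ [lista])
    []

-- ===== PORT B =====
def generar_arreglos_best_case_alt (n : Int) : List (List Int) :=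
  let st := (PySem.List.pyRange 0 (n + 1) 100).foldl
    (fun (st : List Int × List (List Int)) i =>
      let current := st.1 ++ PySem.List.pyRange ((st.1.length : Int) + 1) (i + 1) 1
      (current, st.2 ++ [current]))
    ([], [])
  st.2

-- ===== PRECONDITION & SPEC =====
def Spec_generar_arreglos_best_case (n : Int) (out : List (List Int)) : Prop := out = generar_arreglos_best_case_alt n
instance (n : Int) (out : List (List Int)) : Decidable (Spec_generar_arreglos_best_case n out) := by unfold Spec_generar_arreglos_best_case; infer_instance

-- ===== CLAIM (what is proved, stated in full; the proofs are below) =====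
def Claim_equal_generar_arreglos_best_case : Prop := ∀ (n : Int), Dom_generar_arreglos_best_case n → Spec_generar_arreglos_best_case n (generar_arreglos_best_case n)

-- ===== LEMMAS AND PROOFS =====

-- A's inner append loop reproduces its range.
theorem pv_foldl_append (l : List Int) (acc : List Int) :
    l.foldl (fun lista j => lista ++ [j]) acc = acc ++ l := by
  induction l generalizing acc with
  | nil => simp
  | cons x xs ih => rw [List.foldl_cons, ih]; simp

-- A's outer loop maps each i to [1..i].
theorem pv_A_loop (l : List Int) (acc : List (List Int)) :
    l.foldl
      (fun result i =>
        let lista := (PySem.List.pyRange 1 (i + 1) 1).foldl (fun lista j => lista ++ [j]) []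
        result ++ [lista])
      acc
    = acc ++ l.map (fun i => PySem.List.pyRange 1 (i + 1) 1) := by
  induction l generalizing acc with
  | nil => simp
  | cons x xs ih => rw [List.foldl_cons, ih, pv_foldl_append]; simp

-- Invariant for B's loop: along a nondecreasing chain of steps starting at a
-- nonnegative c, the running prefix entering the loop is [1..c].
theorem pv_B_loop (l : List Int) : ∀ (c : Int) (acc : List (List Int)),
    0 ≤ c → List.IsChain (fun a b => a ≤ b) (c :: l) →
    (l.foldl
      (fun (st : List Int × List (List Int)) i =>
        let current := st.1 ++ PySem.List.pyRange ((st.1.length : Int) + 1) (i + 1) 1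
        (current, st.2 ++ [current]))
      (PySem.List.pyRange 1 (c + 1) 1, acc)).2
    = acc ++ l.map (fun i => PySem.List.pyRange 1 (i + 1) 1) := by
  induction l with
  | nil => intro c acc _ _; simp
  | cons i l ih =>
    intro c acc hc hch
    rcases List.isChain_cons_cons.mp hch with ⟨hci, hch'⟩
    rw [List.foldl_cons]
    have hlen : (((PySem.List.pyRange 1 (c + 1) 1).length : Int) + 1) = c + 1 := by
      rw [PySem.List.length_pyRange_one]
      rw [Int.toNat_of_nonneg (by omega)]
      ring
    have hcur : (PySem.List.pyRange 1 (c + 1) 1) ++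
        PySem.List.pyRange (((PySem.List.pyRange 1 (c + 1) 1).length : Int) + 1) (i + 1) 1
        = PySem.List.pyRange 1 (i + 1) 1 := by
      rw [hlen, ← PySem.List.pyRange_one_append 1 (c + 1) (i + 1) (by omega) (by omega)]
    simp only [hcur]
    rw [ih i (acc ++ [PySem.List.pyRange 1 (i + 1) 1]) (by omega) hch']
    simp

-- The arithmetic progression a, a+100, … is a nondecreasing chain below any x ≤ a.
theorem pv_chain_map_range (M : Nat) : ∀ (x a : Int), x ≤ a →
    List.IsChain (fun p q => p ≤ q) (x :: (List.range M).map (fun k : Nat => a + 100 * (k : Int))) := by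
  induction M with
  | zero => intro x a _; simp
  | succ M ih =>
    intro x a hxa
    rw [List.range_succ_eq_map, List.map_cons, List.map_map]
    refine List.isChain_cons_cons.mpr ⟨by simpa using hxa, ?_⟩
    have : ((List.range M).map ((fun k : Nat => a + 100 * (k : Int)) ∘ Nat.succ))
        = (List.range M).map (fun k : Nat => (a + 100) + 100 * (k : Int)) := by
      apply List.map_congr_left; intro k _
      simp [Function.comp]; ring
    rw [this]
    simpa using ih a (a + 100) (by omega)

-- ===== VERDICT (by name: the statement is the Claim_ definition above) =====
theorem generar_arreglos_best_case_spec : Claim_equal_generar_arreglos_best_case := by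
  intro n _
  show generar_arreglos_best_case n = generar_arreglos_best_case_alt n
  unfold generar_arreglos_best_case generar_arreglos_best_case_alt
  rw [pv_A_loop]
  have hnil : PySem.List.pyRange 1 ((0 : Int) + 1) 1 = ([] : List Int) :=
    PySem.List.pyRange_one_eq_nil (by norm_num)
  rw [show ([] : List Int) = PySem.List.pyRange 1 ((0 : Int) + 1) 1 from hnil.symm]
  rw [pv_B_loop (PySem.List.pyRange 0 (n + 1) 100) 0 [] le_rfl ?_]
  · rw [PySem.List.pyRange_of_pos 0 (n + 1) (by norm_num)]
    exact pv_chain_map_range _ 0 0 le_rfl
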